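-- pv_equiv track=rewrite | github.com/AliceTTXu/LeetCode | alice/LC800.py | find_lest_square
-- ===== SOURCE A (Python) =====
-- def find_lest_square(one_channel):
--     first_digit = int(one_channel[0], 16)
--     second_digit = int(one_channel[1], 16)
--     candidates = set([max(0, first_digit - 1), first_digit, min(first_digit + 1, 15)])
--     temp_min_ls, winner = None, None
--
--     for x in candidates:
--         temp = ((first_digit * 16 + second_digit) - (x * 16 + x)) ** 2
--         if temp_min_ls is None or temp < temp_min_ls:
--             temp_min_ls, winner = temp, x
--
--     return hex(winner)[-1] * 2
-- ===== SOURCE B (Python) =====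
-- def find_lest_square(one_channel):
--     value = int(one_channel[0], 16) * 16 + int(one_channel[1], 16)
--     return "0123456789abcdef"[(value + 8) // 17] * 2
-- ===== Notes on version B (the rewrite author's own statement) =====
-- stated objective: simpler
-- what changed: Replaced the clamped candidate set and the min-scan loop with a closed-form nearest-multiple-of-17 computation (value + 8) // 17 and a direct hex-digit lookup.
import Mathlib
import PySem

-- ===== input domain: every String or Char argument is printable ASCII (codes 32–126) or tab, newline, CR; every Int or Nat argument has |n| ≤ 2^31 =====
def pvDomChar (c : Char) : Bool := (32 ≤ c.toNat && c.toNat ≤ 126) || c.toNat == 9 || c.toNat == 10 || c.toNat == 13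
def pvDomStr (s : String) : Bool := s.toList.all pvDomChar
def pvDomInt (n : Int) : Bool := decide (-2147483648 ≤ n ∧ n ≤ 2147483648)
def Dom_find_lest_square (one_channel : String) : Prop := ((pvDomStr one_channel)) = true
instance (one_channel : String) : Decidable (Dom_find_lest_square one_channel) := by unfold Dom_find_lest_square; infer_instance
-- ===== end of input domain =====

-- B replaces A's candidate set + min-scan with the closed form (value + 8) // 17: simpler.

-- ===== PORT A =====
-- hex(n)[-1]: exact for 0 ≤ n < 16, the only values that reach it (A's winner is a clamped digit)
def pvHexLast (n : Int) : Char :=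
  ['0','1','2','3','4','5','6','7','8','9','a','b','c','d','e','f'].getD n.toNat '0'

def find_lest_square (one_channel : String) : String :=
  match PySem.Str.pyGet? one_channel 0 with
  | none => ""                                   -- IndexError (outside Pre_)
  | some c0 =>
    match PySem.Int.ofStrBase? (String.ofList [c0]) 16 with
    | none => ""                                 -- ValueError (outside Pre_)
    | some first_digit =>
      match PySem.Str.pyGet? one_channel 1 with
      | none => ""                               -- IndexError (outside Pre_)
      | some c1 =>
        match PySem.Int.ofStrBase? (String.ofList [c1]) 16 with
        | none => ""                             -- ValueError (outside Pre_)
        | some second_digit =>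
          let candidates : PySem.Set Int :=
            PySem.Set.ofList [max 0 (first_digit - 1), first_digit, min (first_digit + 1) 15]
          -- iteration over the set: A's argmin is unique, so the result does not depend on hash order
          let r := candidates.foldl (fun (acc : Option Int × Option Int) x =>
              let temp := ((first_digit * 16 + second_digit) - (x * 16 + x)) ^ 2
              match acc.1 with
              | none => (some temp, some x)
              | some tm => if temp < tm then (some temp, some x) else acc) (none, none)
          match r.2 with
          | some winner => String.ofList [pvHexLast winner, pvHexLast winner]
          | none => ""                           -- unreachable: candidates is nonempty

-- ===== PORT B =====
def find_lest_square_alt (one_channel : String) : String :=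
  match (PySem.Str.pyGet? one_channel 0).bind
          (fun c => PySem.Int.ofStrBase? (String.ofList [c]) 16),
        (PySem.Str.pyGet? one_channel 1).bind
          (fun c => PySem.Int.ofStrBase? (String.ofList [c]) 16) with
  | some f, some s =>
      let value := f * 16 + s
      match PySem.Str.pyGet? "0123456789abcdef" (PySem.Int.floordiv (value + 8) 17) with
      | some c => String.ofList [c, c]
      | none => ""                               -- unreachable: 0 ≤ (value+8)//17 < 16
  | _, _ => ""                                   -- IndexError/ValueError (outside Pre_)

-- ===== PRECONDITION & SPEC =====
def pvIsHexDigit (c : Char) : Bool :=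
  (('0' ≤ c && c ≤ '9') || ('a' ≤ c && c ≤ 'f') || ('A' ≤ c && c ≤ 'F'))

-- exactly the inputs on which Python A returns: at least two characters, the first two hex digits
def Pre_find_lest_square (one_channel : String) : Prop :=
  2 ≤ one_channel.toList.length ∧ (one_channel.toList.take 2).all pvIsHexDigit = true
instance (one_channel : String) : Decidable (Pre_find_lest_square one_channel) := by
  unfold Pre_find_lest_square; infer_instance

def pvWitness_find_lest_square : String := "3f"

def Spec_find_lest_square (one_channel : String) (out : String) : Prop := out = find_lest_square_alt one_channel
instance (one_channel : String) (out : String) : Decidable (Spec_find_lest_square one_channel out) := by unfold Spec_find_lest_square; infer_instance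

-- ===== CLAIM (what is proved, stated in full; the proofs are below) =====
def Claim_equal_find_lest_square : Prop := ∀ (one_channel : String), Dom_find_lest_square one_channel → Pre_find_lest_square one_channel → Spec_find_lest_square one_channel (find_lest_square one_channel)

-- ===== LEMMAS AND PROOFS =====

-- single hex char parses to a value in [0,16)
def pvCheck (c : Char) : Bool :=
  match PySem.Int.ofCharsBase? [c] 16 with
  | some n => decide (0 ≤ n ∧ n < 16)
  | none => false

lemma pvCheck_hex (c : Char) (h : pvIsHexDigit c = true) : pvCheck c = true := by
  have hb : (48 ≤ c.toNat ∧ c.toNat ≤ 57) ∨ (97 ≤ c.toNat ∧ c.toNat ≤ 102) ∨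
      (65 ≤ c.toNat ∧ c.toNat ≤ 70) := by
    simp only [pvIsHexDigit, Bool.or_eq_true, Bool.and_eq_true, decide_eq_true_eq,
      Char.le_def, UInt32.le_iff_toNat_le, Char.toNat] at h ⊢
    rcases h with (⟨h1, h2⟩ | ⟨h1, h2⟩) | ⟨h1, h2⟩
    · exact Or.inl ⟨h1, h2⟩
    · exact Or.inr (Or.inl ⟨h1, h2⟩)
    · exact Or.inr (Or.inr ⟨h1, h2⟩)
  have hcn : c = Char.ofNat c.toNat := (Char.ofNat_toNat c).symm
  rw [hcn]
  generalize c.toNat = n at hb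
  rcases hb with ⟨h1, h2⟩ | ⟨h1, h2⟩ | ⟨h1, h2⟩ <;> interval_cases n <;> decide

-- A's core and B's core agree on all digit pairs
set_option maxRecDepth 8192 in
lemma pvCore_eq : ∀ (a b : Fin 16),
    (let first_digit : Int := (a.val : Int)
     let second_digit : Int := (b.val : Int)
     let candidates : PySem.Set Int :=
       PySem.Set.ofList [max 0 (first_digit - 1), first_digit, min (first_digit + 1) 15]
     let r := candidates.foldl (fun (acc : Option Int × Option Int) x =>
         let temp := ((first_digit * 16 + second_digit) - (x * 16 + x)) ^ 2
         match acc.1 with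
         | none => (some temp, some x)
         | some tm => if temp < tm then (some temp, some x) else acc) (none, none)
     match r.2 with
     | some winner => String.ofList [pvHexLast winner, pvHexLast winner]
     | none => "") =
    (match PySem.Str.pyGet? "0123456789abcdef" (PySem.Int.floordiv (((a.val : Int)) * 16 + ((b.val : Int)) + 8) 17) with
     | some c => String.ofList [c, c]
     | none => "") := by decide

-- ===== VERDICT (by name: the statement is the Claim_ definition above) =====
theorem find_lest_square_spec : Claim_equal_find_lest_square := by
  intro oc _ hpre
  obtain ⟨hlen, hmem⟩ := hpre
  unfold Spec_find_lest_square find_lest_square find_lest_square_alt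
  match hoc : oc.toList with
  | [] => rw [hoc] at hlen; simp at hlen
  | [c] => rw [hoc] at hlen; simp at hlen
  | c0 :: c1 :: rest =>
    rw [hoc] at hmem
    simp only [List.take, List.all_cons, List.all_nil, Bool.and_eq_true, Bool.and_true] at hmem
    obtain ⟨h0, h1⟩ := hmem
    have hg0 : PySem.Str.pyGet? oc 0 = some c0 := by
      rw [show (0 : Int) = ((0 : Nat) : Int) from rfl, PySem.Str.pyGet?_natCast, hoc]; rfl
    have hg1 : PySem.Str.pyGet? oc 1 = some c1 := by
      rw [show (1 : Int) = ((1 : Nat) : Int) from rfl, PySem.Str.pyGet?_natCast, hoc]; rfl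
    have hc0 := pvCheck_hex c0 h0
    have hc1 := pvCheck_hex c1 h1
    unfold pvCheck at hc0 hc1
    cases hp0 : PySem.Int.ofCharsBase? [c0] 16 with
    | none => rw [hp0] at hc0; simp at hc0
    | some f =>
      cases hp1 : PySem.Int.ofCharsBase? [c1] 16 with
      | none => rw [hp1] at hc1; simp at hc1
      | some s =>
        rw [hp0] at hc0; rw [hp1] at hc1
        simp only [decide_eq_true_eq] at hc0 hc1
        have hs0 : PySem.Int.ofStrBase? (String.ofList [c0]) 16 = some f := by
          rw [PySem.Int.ofStrBase?_ofList]; exact hp0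
        have hs1 : PySem.Int.ofStrBase? (String.ofList [c1]) 16 = some s := by
          rw [PySem.Int.ofStrBase?_ofList]; exact hp1
        rw [hg0, hg1]
        simp only [Option.bind_some, hs0, hs1]
        have := pvCore_eq ⟨f.toNat, by omega⟩ ⟨s.toNat, by omega⟩
        simp only [] at this
        rw [show ((f.toNat : Int)) = f from by omega, show ((s.toNat : Int)) = s from by omega] at this
        exact this
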